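-- pv_equiv track=rewrite | github.com/kopaltekriwal/VeteranHire | VeteranHireRepoPush/backend/app.py | derive_gap_and_courses
-- ===== SOURCE A (Python) =====
-- def derive_gap_and_courses(skills: list[str]) -> tuple[list[str], list[str]]:
--     gap_bank = {
--         'Python': ('AI', 'AI Basics'),
--         'Leadership': ('Data Analysis', 'Data Analytics'),
--         'Operations': ('Cloud Tools', 'Cloud Foundations'),
--         'Logistics': ('ERP', 'ERP for Operations'),
--         'Communication': ('Stakeholder Management', 'Business Communication'),
--         'Project Management': ('Agile', 'Agile Fundamentals'),
--         'Excel': ('BI Tools', 'Power BI Essentials'),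
--     }
--
--     found_gaps: list[str] = []
--     found_courses: list[str] = []
--
--     for skill in skills:
--         gap, course = gap_bank.get(skill, ('Digital Skills', 'Digital Skills Bootcamp'))
--         if gap not in found_gaps:
--             found_gaps.append(gap)
--         if course not in found_courses:
--             found_courses.append(course)
--
--     if not found_gaps:
--         found_gaps = ['AI', 'Data Analysis']
--         found_courses = ['AI Basics', 'Data Analytics']
--
--     return found_gaps[:4], found_courses[:4]
-- ===== SOURCE B (Python) =====
-- def derive_gap_and_courses(skills: list[str]) -> tuple[list[str], list[str]]:
--     gap_bank = {
--         'Python': ('AI', 'AI Basics'),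
--         'Leadership': ('Data Analysis', 'Data Analytics'),
--         'Operations': ('Cloud Tools', 'Cloud Foundations'),
--         'Logistics': ('ERP', 'ERP for Operations'),
--         'Communication': ('Stakeholder Management', 'Business Communication'),
--         'Project Management': ('Agile', 'Agile Fundamentals'),
--         'Excel': ('BI Tools', 'Power BI Essentials'),
--     }
--     pairs = [gap_bank.get(s, ('Digital Skills', 'Digital Skills Bootcamp')) for s in skills]
--     deduped = list(dict.fromkeys(pairs))[:4]
--     if not deduped:
--         return ['AI', 'Data Analysis'], ['AI Basics', 'Data Analytics']
--     found_gaps, found_courses = zip(*deduped)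
--     return list(found_gaps), list(found_courses)
-- ===== Notes on version B (the rewrite author's own statement) =====
-- stated objective: simpler
-- what changed: Replaces A's single loop maintaining two membership-checked accumulator lists with a three-pass pipeline: map skills to (gap, course) pairs, dedup the pairs as whole units via dict.fromkeys, then truncate and unzip into the two lists (valid because each gap corresponds to exactly one course).
import Mathlib
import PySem

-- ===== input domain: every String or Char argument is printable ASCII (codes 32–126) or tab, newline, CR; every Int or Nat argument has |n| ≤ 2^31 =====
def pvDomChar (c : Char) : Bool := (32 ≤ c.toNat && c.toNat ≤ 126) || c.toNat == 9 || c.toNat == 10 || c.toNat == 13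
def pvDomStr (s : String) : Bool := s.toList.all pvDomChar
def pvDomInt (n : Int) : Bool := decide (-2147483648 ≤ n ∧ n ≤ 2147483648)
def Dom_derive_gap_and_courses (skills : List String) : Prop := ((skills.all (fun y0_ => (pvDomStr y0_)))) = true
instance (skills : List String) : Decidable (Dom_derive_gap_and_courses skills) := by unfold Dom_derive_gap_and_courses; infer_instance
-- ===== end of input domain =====

-- B maps each skill to its (gap, course) pair, dedups the pairs as whole units (valid because each
-- gap pairs with exactly one course), truncates, and unzips — replacing A's two independent
-- membership-checked accumulators with map → dedup → unzip (objective: simpler decomposition).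

-- ===== PORT A =====
def pvGapBank : PySem.Dict String (String × String) := PySem.Dict.ofList
  [ ("Python", ("AI", "AI Basics")),
    ("Leadership", ("Data Analysis", "Data Analytics")),
    ("Operations", ("Cloud Tools", "Cloud Foundations")),
    ("Logistics", ("ERP", "ERP for Operations")),
    ("Communication", ("Stakeholder Management", "Business Communication")),
    ("Project Management", ("Agile", "Agile Fundamentals")),
    ("Excel", ("BI Tools", "Power BI Essentials")) ]

def derive_gap_and_courses (skills : List String) : List String × List String :=
  let st := skills.foldl (fun (acc : List String × List String) skill =>
      let gc := pvGapBank.getD skill ("Digital Skills", "Digital Skills Bootcamp")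
      let found_gaps := if gc.1 ∈ acc.1 then acc.1 else acc.1 ++ [gc.1]
      let found_courses := if gc.2 ∈ acc.2 then acc.2 else acc.2 ++ [gc.2]
      (found_gaps, found_courses)) ([], [])
  let st' := if st.1 = [] then (["AI", "Data Analysis"], ["AI Basics", "Data Analytics"]) else st
  (PySem.List.slice st'.1 none (some 4), PySem.List.slice st'.2 none (some 4))

-- ===== PORT B =====
def derive_gap_and_courses_alt (skills : List String) : List String × List String :=
  let pairs := skills.map (fun s => pvGapBank.getD s ("Digital Skills", "Digital Skills Bootcamp"))
  let deduped := PySem.List.slice (PySem.List.dedup pairs) none (some 4)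
  if deduped = [] then (["AI", "Data Analysis"], ["AI Basics", "Data Analytics"])
  else deduped.unzip

-- ===== PRECONDITION & SPEC =====
def Spec_derive_gap_and_courses (skills : List String) (out : List String × List String) : Prop := out = derive_gap_and_courses_alt skills
instance (skills : List String) (out : List String × List String) : Decidable (Spec_derive_gap_and_courses skills out) := by unfold Spec_derive_gap_and_courses; infer_instance

-- ===== CLAIM (what is proved, stated in full; the proofs are below) =====
def Claim_equal_derive_gap_and_courses : Prop := ∀ (skills : List String), Dom_derive_gap_and_courses skills → Spec_derive_gap_and_courses skills (derive_gap_and_courses skills)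

-- ===== LEMMAS AND PROOFS =====

-- the eight pairs either program can ever produce (the seven bank values plus the default)
def pvAllPairs : List (String × String) :=
  [ ("AI", "AI Basics"), ("Data Analysis", "Data Analytics"), ("Cloud Tools", "Cloud Foundations"),
    ("ERP", "ERP for Operations"), ("Stakeholder Management", "Business Communication"),
    ("Agile", "Agile Fundamentals"), ("BI Tools", "Power BI Essentials"),
    ("Digital Skills", "Digital Skills Bootcamp") ]

lemma pvBank_mem (s : String) :
    pvGapBank.getD s ("Digital Skills", "Digital Skills Bootcamp") ∈ pvAllPairs := by
  rcases h : pvGapBank.get? s with _ | v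
  · simp [PySem.Dict.getD, h, pvAllPairs]
  · have hv : (s, v) ∈ pvGapBank.items := PySem.Dict.mem_items_of_get?_eq_some pvGapBank h
    have hit : pvGapBank.items =
      [ ("Python", ("AI", "AI Basics")),
        ("Leadership", ("Data Analysis", "Data Analytics")),
        ("Operations", ("Cloud Tools", "Cloud Foundations")),
        ("Logistics", ("ERP", "ERP for Operations")),
        ("Communication", ("Stakeholder Management", "Business Communication")),
        ("Project Management", ("Agile", "Agile Fundamentals")),
        ("Excel", ("BI Tools", "Power BI Essentials")) ] := by decide
    rw [hit] at hv
    simp only [List.mem_cons, List.not_mem_nil, or_false, Prod.mk.injEq] at hv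
    simp only [PySem.Dict.getD, h, Option.getD_some]
    rcases hv with ⟨_, rfl⟩ | ⟨_, rfl⟩ | ⟨_, rfl⟩ | ⟨_, rfl⟩ | ⟨_, rfl⟩ | ⟨_, rfl⟩ | ⟨_, rfl⟩ <;>
      simp [pvAllPairs]

lemma pvPairInj : ∀ p ∈ pvAllPairs, ∀ q ∈ pvAllPairs,
    (p.1 = q.1 → p = q) ∧ (p.2 = q.2 → p = q) := by decide

lemma pvMemFst {P : List (String × String)} {q : String × String}
    (hP : ∀ p ∈ P, p ∈ pvAllPairs) (hq : q ∈ pvAllPairs) :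
    q.1 ∈ P.map Prod.fst ↔ q ∈ P := by
  constructor
  · intro h
    rcases List.mem_map.mp h with ⟨p, hp, he⟩
    have := ((pvPairInj p (hP p hp) q hq).1 he)
    exact this ▸ hp
  · intro h; exact List.mem_map.mpr ⟨q, h, rfl⟩

lemma pvMemSnd {P : List (String × String)} {q : String × String}
    (hP : ∀ p ∈ P, p ∈ pvAllPairs) (hq : q ∈ pvAllPairs) :
    q.2 ∈ P.map Prod.snd ↔ q ∈ P := by
  constructor
  · intro h
    rcases List.mem_map.mp h with ⟨p, hp, he⟩
    have := ((pvPairInj p (hP p hp) q hq).2 he)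
    exact this ▸ hp
  · intro h; exact List.mem_map.mpr ⟨q, h, rfl⟩

lemma pvLoop_eq (skills : List String) : ∀ (P : List (String × String)),
    (∀ p ∈ P, p ∈ pvAllPairs) →
    skills.foldl (fun (acc : List String × List String) skill =>
      let gc := pvGapBank.getD skill ("Digital Skills", "Digital Skills Bootcamp")
      let found_gaps := if gc.1 ∈ acc.1 then acc.1 else acc.1 ++ [gc.1]
      let found_courses := if gc.2 ∈ acc.2 then acc.2 else acc.2 ++ [gc.2]
      (found_gaps, found_courses)) (P.map Prod.fst, P.map Prod.snd)
    = ((List.foldl PySem.Set.add P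
          (skills.map (fun s => pvGapBank.getD s ("Digital Skills", "Digital Skills Bootcamp")))).map Prod.fst,
       (List.foldl PySem.Set.add P
          (skills.map (fun s => pvGapBank.getD s ("Digital Skills", "Digital Skills Bootcamp")))).map Prod.snd) := by
  induction skills with
  | nil => intro P hP; simp
  | cons s rest ih =>
    intro P hP
    have hq : pvGapBank.getD s ("Digital Skills", "Digital Skills Bootcamp") ∈ pvAllPairs :=
      pvBank_mem s
    set q := pvGapBank.getD s ("Digital Skills", "Digital Skills Bootcamp") with hqdef
    by_cases hmem : q ∈ P
    · have h1 : q.1 ∈ P.map Prod.fst := (pvMemFst hP hq).mpr hmem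
      have h2 : q.2 ∈ P.map Prod.snd := (pvMemSnd hP hq).mpr hmem
      have hadd : PySem.Set.add P q = P := by
        simp [PySem.Set.add, hmem]
      simp only [List.foldl_cons, List.map_cons, ← hqdef]
      rw [if_pos h1, if_pos h2, hadd]
      exact ih P hP
    · have h1 : q.1 ∉ P.map Prod.fst := fun h => hmem ((pvMemFst hP hq).mp h)
      have h2 : q.2 ∉ P.map Prod.snd := fun h => hmem ((pvMemSnd hP hq).mp h)
      have hadd : PySem.Set.add P q = P ++ [q] := by
        simp [PySem.Set.add, hmem]
      have hP' : ∀ p ∈ P ++ [q], p ∈ pvAllPairs := by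
        intro p hp
        rcases List.mem_append.mp hp with h | h
        · exact hP p h
        · simp at h; exact h ▸ hq
      simp only [List.foldl_cons, List.map_cons, ← hqdef]
      rw [if_neg h1, if_neg h2, hadd]
      have hst : (P.map Prod.fst ++ [q.1], P.map Prod.snd ++ [q.2])
          = ((P ++ [q]).map Prod.fst, (P ++ [q]).map Prod.snd) := by simp
      rw [hst]
      exact ih (P ++ [q]) hP'

-- ===== VERDICT (by name: the statement is the Claim_ definition above) =====
theorem derive_gap_and_courses_spec : Claim_equal_derive_gap_and_courses := by
  intro skills _
  unfold Spec_derive_gap_and_courses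
  show derive_gap_and_courses skills = derive_gap_and_courses_alt skills
  have hmain := pvLoop_eq skills [] (by simp)
  simp only [List.map_nil] at hmain
  simp only [derive_gap_and_courses, derive_gap_and_courses_alt]
  rw [hmain]
  set D := List.foldl PySem.Set.add []
      (skills.map (fun s => pvGapBank.getD s ("Digital Skills", "Digital Skills Bootcamp"))) with hD
  have hdedup : PySem.List.dedup
      (skills.map (fun s => pvGapBank.getD s ("Digital Skills", "Digital Skills Bootcamp"))) = D := by
    simp [PySem.List.dedup, PySem.Set.ofList, PySem.Set.empty, hD]
  rw [hdedup]
  have h4 : (0 : Int) ≤ 4 := by norm_num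
  by_cases hE : D = []
  · simp [hE, PySem.List.slice_to _ h4]
  · have h1 : D.map Prod.fst ≠ [] := by simp [hE]
    rw [if_neg h1]
    rw [PySem.List.slice_to _ h4, PySem.List.slice_to _ h4, PySem.List.slice_to _ h4]
    have h2 : D.take (4 : Int).toNat ≠ [] := by simp [hE]
    rw [if_neg h2]
    simp [List.unzip_eq_map, List.map_take]
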